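-- pv_equiv track=rewrite | github.com/shubhamkaushal765/ac_roster | acroster/statistics.py | _filter_statistics
-- ===== SOURCE A (Python) =====
-- from typing import List, Tuple
--
-- def _filter_statistics(
--
--         statistics_list: List[Tuple[str, str, str]]
-- ) -> List[Tuple[str, str, str]]:
--     """
--     Filter statistics to show only relevant time slots.
--
--     Shows:
--     - Every 4th slot (hourly)
--     - Every 2nd slot if zone distribution changed
--
--     Args:
--         statistics_list: Full list of statistics
--
--     Returns:
--         Filtered list of statistics
--     """
--     stats = []
--     for i, t in enumerate(statistics_list):
--         if i % 4 == 0: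
--             stats.append(t)
--         elif i % 2 == 0 and t[2] != stats[-1][2]:
--             stats.append(t)
--
--     return stats
-- ===== SOURCE B (Python) =====
-- from typing import List, Tuple
--
-- def _filter_statistics(
--         statistics_list: List[Tuple[str, str, str]]
-- ) -> List[Tuple[str, str, str]]:
--     """Recursive block decomposition: the kept slots are determined block of
--     four by block of four — each block contributes its head (the hourly slot)
--     and, if the block has a third slot whose zone column differs from the
--     head's, that third slot; then recurse on the rest of the list."""
--     if not statistics_list:
--         return []
--     head = statistics_list[0]
--     out = [head]
--     if len(statistics_list) >= 3 and statistics_list[2][2] != head[2]: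
--         out.append(statistics_list[2])
--     return out + _filter_statistics(statistics_list[4:])
-- ===== Notes on version B (the rewrite author's own statement) =====
-- stated objective: alternative
-- what changed: Replaces the single indexed pass with mod-4/mod-2 tests against a growing stats[-1] accumulator by a recursion over blocks of four slots that emits each block's head and, when present and zone-changed, its third slot, then recurses on the remainder.
import Mathlib
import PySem

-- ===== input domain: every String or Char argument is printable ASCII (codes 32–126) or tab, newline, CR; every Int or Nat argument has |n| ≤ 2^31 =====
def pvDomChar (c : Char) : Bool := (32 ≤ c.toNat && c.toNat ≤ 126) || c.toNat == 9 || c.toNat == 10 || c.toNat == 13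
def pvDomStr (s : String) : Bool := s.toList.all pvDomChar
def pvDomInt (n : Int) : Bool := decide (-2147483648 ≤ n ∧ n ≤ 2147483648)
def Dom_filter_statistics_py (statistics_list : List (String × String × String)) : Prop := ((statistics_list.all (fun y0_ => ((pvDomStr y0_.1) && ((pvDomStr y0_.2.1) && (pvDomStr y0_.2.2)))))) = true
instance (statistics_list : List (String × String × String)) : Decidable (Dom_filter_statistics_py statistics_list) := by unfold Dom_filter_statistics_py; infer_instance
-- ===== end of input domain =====

-- B replaces A's single indexed pass (mod tests, stats[-1] accumulator) with a
-- recursive block-of-four decomposition: emit the block head, conditionally the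
-- block's third slot, recurse on the rest (objective: alternative decomposition).

-- ===== PORT A =====
-- one loop step of A: 'if i % 4 == 0: append; elif i % 2 == 0 and t[2] != stats[-1][2]: append'
def pvStepA (stats : List (String × String × String)) :
    Int × (String × String × String) → List (String × String × String)
  | (i, t) =>
    if i % 4 = 0 then stats ++ [t]
    else if i % 2 = 0 then
      match PySem.List.pyGet? stats (-1) with   -- stats[-1]; none = IndexError (unreachable: stats ≠ [] here)
      | some last => if t.2.2 ≠ last.2.2 then stats ++ [t] else stats
      | none => stats
    else stats

def filter_statistics_py (statistics_list : List (String × String × String)) :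
    List (String × String × String) :=
  (PySem.List.enumerate statistics_list 0).foldl pvStepA []

-- ===== PORT B =====
-- Source B: empty -> []; else out = [head] (+ lst[2] if len>=3 and its zone differs),
-- then out ++ recursive call on lst[4:]
def filter_statistics_py_alt : List (String × String × String) → List (String × String × String)
  | [] => []
  | head :: tail =>
    let out := [head] ++
      (if 3 ≤ (head :: tail).length then
         match PySem.List.pyGet? (head :: tail) 2 with   -- statistics_list[2]
         | some c => if c.2.2 ≠ head.2.2 then [c] else []
         | none => []
       else [])
    out ++ filter_statistics_py_alt (PySem.List.slice (head :: tail) (some 4) none)   -- statistics_list[4:]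
  termination_by l => l.length
  decreasing_by
    simp [PySem.List.slice]

-- ===== PRECONDITION & SPEC =====
def Spec_filter_statistics_py (statistics_list : List (String × String × String)) (out : List (String × String × String)) : Prop := out = filter_statistics_py_alt statistics_list
instance (statistics_list : List (String × String × String)) (out : List (String × String × String)) : Decidable (Spec_filter_statistics_py statistics_list out) := by unfold Spec_filter_statistics_py; infer_instance

-- ===== CLAIM (what is proved, stated in full; the proofs are below) =====
def Claim_equal_filter_statistics_py : Prop := ∀ (statistics_list : List (String × String × String)), Dom_filter_statistics_py statistics_list → Spec_filter_statistics_py statistics_list (filter_statistics_py statistics_list)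

-- ===== LEMMAS AND PROOFS =====

-- common reference shape: the result, chunked in blocks of four slots
def pvChunk : List (String × String × String) → List (String × String × String)
  | a :: _ :: c :: _ :: rest =>
      a :: ((if c.2.2 ≠ a.2.2 then [c] else []) ++ pvChunk rest)
  | [a, _, c] => a :: (if c.2.2 ≠ a.2.2 then [c] else [])
  | [a, _] => [a]
  | [a] => [a]
  | [] => []

lemma pvStepA_keep (s : List (String × String × String)) (i : Int) (t : String × String × String)
    (h : i % 4 = 0) : pvStepA s (i, t) = s ++ [t] := by
  simp only [pvStepA]; rw [if_pos h]

lemma pvStepA_skip (s : List (String × String × String)) (i : Int) (t : String × String × String)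
    (h4 : ¬ i % 4 = 0) (h2 : ¬ i % 2 = 0) : pvStepA s (i, t) = s := by
  simp only [pvStepA]; rw [if_neg h4, if_neg h2]

lemma pvStepA_cmp (s : List (String × String × String)) (a : String × String × String)
    (i : Int) (t : String × String × String) (h4 : ¬ i % 4 = 0) (h2 : i % 2 = 0) :
    pvStepA (s ++ [a]) (i, t) = (s ++ [a]) ++ (if t.2.2 ≠ a.2.2 then [t] else []) := by
  simp only [pvStepA]
  rw [if_neg h4, if_pos h2, PySem.List.pyGet?_neg_one_append_singleton]
  by_cases hc : t.2.2 ≠ a.2.2 <;> simp [hc]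

lemma pvA_gen (rest : List (String × String × String)) :
    ∀ (i : Int), i % 4 = 0 →
    ∀ s0, (PySem.List.enumerate rest i).foldl pvStepA s0 = s0 ++ pvChunk rest := by
  induction rest using pvChunk.induct with
  | case1 a b c d rest ih =>
      intro i hi s0
      simp only [PySem.List.enumerate_cons, List.foldl_cons]
      rw [pvStepA_keep s0 i a hi,
        pvStepA_skip _ (i+1) b (by omega) (by omega),
        pvStepA_cmp s0 a (i+1+1) c (by omega) (by omega),
        pvStepA_skip _ (i+1+1+1) d (by omega) (by omega),
        show i+1+1+1+1 = i+4 from by ring,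
        ih (i+4) (by omega)]
      by_cases hc : c.2.2 ≠ a.2.2 <;> simp [hc, pvChunk]
  | case2 a b c =>
      intro i hi s0
      simp only [PySem.List.enumerate_cons, PySem.List.enumerate_nil, List.foldl_cons,
        List.foldl_nil]
      rw [pvStepA_keep s0 i a hi,
        pvStepA_skip _ (i+1) b (by omega) (by omega),
        pvStepA_cmp s0 a (i+1+1) c (by omega) (by omega)]
      by_cases hc : c.2.2 ≠ a.2.2 <;> simp [hc, pvChunk]
  | case3 a b =>
      intro i hi s0
      simp only [PySem.List.enumerate_cons, PySem.List.enumerate_nil, List.foldl_cons,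
        List.foldl_nil]
      rw [pvStepA_keep s0 i a hi, pvStepA_skip _ (i+1) b (by omega) (by omega)]
      simp [pvChunk]
  | case4 a =>
      intro i hi s0
      simp only [PySem.List.enumerate_cons, PySem.List.enumerate_nil, List.foldl_cons,
        List.foldl_nil]
      rw [pvStepA_keep s0 i a hi]
      simp [pvChunk]
  | case5 =>
      intro i hi s0
      simp [pvChunk]

-- B's recursive block function computes the same chunked shape
lemma pvB_eq_chunk (l : List (String × String × String)) :
    filter_statistics_py_alt l = pvChunk l := by
  induction l using pvChunk.induct with
  | case1 a b c d rest ih =>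
      have h2 : ((2:Int) ≤ (rest.length : Int) + 1 + 1 + 1) := by omega
      simp only [filter_statistics_py_alt]
      simp [pvChunk, PySem.List.pyGet?, PySem.List.pyIdx?, PySem.List.slice, ih, h2]
  | case2 a b c =>
      simp only [filter_statistics_py_alt]
      simp [pvChunk, PySem.List.slice,
        filter_statistics_py_alt]
  | case3 a b =>
      simp only [filter_statistics_py_alt]
      simp [pvChunk, PySem.List.slice,
        filter_statistics_py_alt]
  | case4 a =>
      simp only [filter_statistics_py_alt]
      simp [pvChunk, PySem.List.slice,
        filter_statistics_py_alt]
  | case5 =>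
      simp [filter_statistics_py_alt, pvChunk]

-- ===== VERDICT (by name: the statement is the Claim_ definition above) =====
theorem filter_statistics_py_spec : Claim_equal_filter_statistics_py := by
  intro l _
  unfold Spec_filter_statistics_py filter_statistics_py
  rw [pvA_gen l 0 (by omega) [], List.nil_append, pvB_eq_chunk]
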